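-- pv_equiv track=rewrite | github.com/TurboKach/telegram-channel-repost-bot | instagram_downloader.py | is_instagram_url
-- ===== SOURCE A (Python) =====
-- def is_instagram_url(text: str) -> bool:
--     """
--     Check if text contains Instagram URL.
--     Using startswith for simplicity as requested.
--     """
--     if not text:
--         return False
--
--     text = text.strip().lower()
--
--     # Check for various Instagram URL patterns
--     instagram_patterns = [
--         'https://www.instagram.com/',
--         'http://www.instagram.com/',
--         'https://instagram.com/',
--         'http://instagram.com/',
--         'www.instagram.com/',
--         'instagram.com/',
--     ]
--
--     for pattern in instagram_patterns:
--         if text.startswith(pattern):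
--             return True
--
--     return False
-- ===== SOURCE B (Python) =====
-- def is_instagram_url(text: str) -> bool:
--     """
--     Check if text starts with an Instagram URL.
--     Optional-prefix peeling instead of a 6-pattern enumeration.
--     """
--     if not text:
--         return False
--
--     t = text.strip().lower()
--
--     for scheme in ('https://', 'http://'):
--         if t.startswith(scheme):
--             t = t[len(scheme):]
--             break
--
--     if t.startswith('www.'):
--         t = t[4:]
--
--     return t.startswith('instagram.com/')
-- ===== Notes on version B (the rewrite author's own statement) =====
-- stated objective: simpler
-- what changed: Replaces A's enumeration of six full URL-prefix patterns by peeling an optional scheme prefix and an optional www prefix from the stripped lowercased text, then one single startswith check of the bare domain.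
import Mathlib
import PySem

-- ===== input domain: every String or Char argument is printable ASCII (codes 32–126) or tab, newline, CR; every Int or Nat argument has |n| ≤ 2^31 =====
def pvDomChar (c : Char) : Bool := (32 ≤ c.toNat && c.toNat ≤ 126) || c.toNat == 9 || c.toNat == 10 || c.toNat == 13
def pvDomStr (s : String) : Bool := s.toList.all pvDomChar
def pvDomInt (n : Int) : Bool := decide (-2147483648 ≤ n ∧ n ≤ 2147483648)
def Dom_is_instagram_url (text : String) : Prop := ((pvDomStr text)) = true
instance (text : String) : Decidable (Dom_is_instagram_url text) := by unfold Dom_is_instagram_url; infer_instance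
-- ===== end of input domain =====

-- B replaces A's 6-pattern enumeration by peeling an optional scheme and an optional 'www.'
-- prefix followed by a single 'instagram.com/' check (objective: simpler).


-- ===== PORT A =====
def is_instagram_url (text : String) : Bool :=
  if PySem.Str.len text == 0 then false
  else
    let t := PySem.Str.lower (PySem.Str.strip text)
    let instagram_patterns : List String :=
      [ "https://www.instagram.com/",
        "http://www.instagram.com/",
        "https://instagram.com/",
        "http://instagram.com/",
        "www.instagram.com/",
        "instagram.com/" ]
    -- 'for pattern in …: if t.startswith(pattern): return True / return False' = any
    instagram_patterns.any (fun pattern => PySem.Str.startswith t pattern)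

-- ===== PORT B =====
def is_instagram_url_alt (text : String) : Bool :=
  if PySem.Str.len text == 0 then false
  else
    let t0 := PySem.Str.lower (PySem.Str.strip text)
    -- 'for scheme in ("https://", "http://"): if t.startswith(scheme): t = t[len(scheme):]; break'
    let t1 :=
      if PySem.Str.startswith t0 "https://" then PySem.Str.slice t0 (some 8) none
      else if PySem.Str.startswith t0 "http://" then PySem.Str.slice t0 (some 7) none
      else t0
    let t2 := if PySem.Str.startswith t1 "www." then PySem.Str.slice t1 (some 4) none else t1
    PySem.Str.startswith t2 "instagram.com/"

-- ===== PRECONDITION & SPEC =====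
def Spec_is_instagram_url (text : String) (out : Bool) : Prop := out = is_instagram_url_alt text
instance (text : String) (out : Bool) : Decidable (Spec_is_instagram_url text out) := by unfold Spec_is_instagram_url; infer_instance

-- ===== CLAIM (what is proved, stated in full; the proofs are below) =====
def Claim_equal_is_instagram_url : Prop := ∀ (text : String), Dom_is_instagram_url text → Spec_is_instagram_url text (is_instagram_url text)

-- ===== LEMMAS AND PROOFS =====

-- the two peeling phases of B, as list-level helpers for the proofs
def schemePhase (l : List Char) : List Char :=
  if PySem.Chars.startswith l "https://".toList then l.drop 8
  else if PySem.Chars.startswith l "http://".toList then l.drop 7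
  else l

def wwwPhase (l : List Char) : List Char :=
  if PySem.Chars.startswith l "www.".toList then l.drop 4 else l

theorem startswith_false_of_not_prefix {l p : List Char} (h : ¬ p <+: l) :
    PySem.Chars.startswith l p = false := by
  rw [← Bool.not_eq_true, PySem.Chars.startswith_iff]; exact h

theorem www_step (m : List Char) :
    (PySem.Chars.startswith m "www.instagram.com/".toList
      || PySem.Chars.startswith m "instagram.com/".toList)
    = PySem.Chars.startswith (wwwPhase m) "instagram.com/".toList := by
  unfold wwwPhase
  by_cases hw : "www.".toList <+: m
  · obtain ⟨r, rfl⟩ := hw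
    simp [PySem.Chars.startswith, List.isPrefixOf]
  · have h1 : PySem.Chars.startswith m "www.".toList = false :=
      startswith_false_of_not_prefix hw
    have h2 : PySem.Chars.startswith m "www.instagram.com/".toList = false :=
      startswith_false_of_not_prefix
        (fun h => hw ((by decide : "www.".toList <+: "www.instagram.com/".toList).trans h))
    simp at h1 h2
    simp [h1, h2]

theorem key (l : List Char) :
    (PySem.Chars.startswith l "https://www.instagram.com/".toList
      || (PySem.Chars.startswith l "http://www.instagram.com/".toList
      || (PySem.Chars.startswith l "https://instagram.com/".toList
      || (PySem.Chars.startswith l "http://instagram.com/".toList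
      || (PySem.Chars.startswith l "www.instagram.com/".toList
      || PySem.Chars.startswith l "instagram.com/".toList)))))
    = PySem.Chars.startswith (wwwPhase (schemePhase l)) "instagram.com/".toList := by
  unfold schemePhase
  by_cases hs1 : "https://".toList <+: l
  · obtain ⟨r, rfl⟩ := hs1
    have h := www_step r
    simp at h
    simp [PySem.Chars.startswith, List.isPrefixOf]
    exact h
  · have e2 : PySem.Chars.startswith l "https://www.instagram.com/".toList = false :=
      startswith_false_of_not_prefix
        (fun h => hs1 ((by decide : "https://".toList <+: "https://www.instagram.com/".toList).trans h))
    have e3 : PySem.Chars.startswith l "https://instagram.com/".toList = false :=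
      startswith_false_of_not_prefix
        (fun h => hs1 ((by decide : "https://".toList <+: "https://instagram.com/".toList).trans h))
    by_cases hs2 : "http://".toList <+: l
    · obtain ⟨r, rfl⟩ := hs2
      have h := www_step r
      simp at h
      simp at e2 e3
      simp [PySem.Chars.startswith, List.isPrefixOf]
      exact h
    · have e1 : PySem.Chars.startswith l "https://".toList = false :=
        startswith_false_of_not_prefix hs1
      have f1 : PySem.Chars.startswith l "http://".toList = false :=
        startswith_false_of_not_prefix hs2
      have f2 : PySem.Chars.startswith l "http://www.instagram.com/".toList = false :=
        startswith_false_of_not_prefix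
          (fun h => hs2 ((by decide : "http://".toList <+: "http://www.instagram.com/".toList).trans h))
      have f3 : PySem.Chars.startswith l "http://instagram.com/".toList = false :=
        startswith_false_of_not_prefix
          (fun h => hs2 ((by decide : "http://".toList <+: "http://instagram.com/".toList).trans h))
      have h := www_step l
      simp at h e1 e2 e3 f1 f2 f3
      simp [e1, e2, e3, f1, f2, f3]
      exact h

-- ===== VERDICT (by name: the statement is the Claim_ definition above) =====
theorem is_instagram_url_spec : Claim_equal_is_instagram_url := by
  intro text _
  unfold Spec_is_instagram_url is_instagram_url is_instagram_url_alt
  rcases h0 : (PySem.Str.len text == 0) with _ | _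
  · have e8 : ∀ (xs : List Char), PySem.List.slice xs (some (8 : Int)) none = xs.drop 8 := by
      intro xs
      have h := PySem.List.slice_from xs (a := 8) (by norm_num)
      simpa using h
    have e4 : ∀ (xs : List Char), PySem.List.slice xs (some (4 : Int)) none = xs.drop 4 := by
      intro xs
      have h := PySem.List.slice_from xs (a := 4) (by norm_num)
      simpa using h
    have e7 : ∀ (xs : List Char), PySem.List.slice xs (some (7 : Int)) none = xs.drop 7 := by
      intro xs
      have h := PySem.List.slice_from xs (a := 7) (by norm_num)
      simpa using h
    simp only [Bool.false_eq_true, if_false, List.any_cons, List.any_nil, Bool.or_false,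
      PySem.Str.startswith_eq, PySem.Str.toList_slice, apply_ite String.toList,
      PySem.Chars.slice_eq_listSlice, e8, e7, e4]
    generalize (PySem.Str.lower (PySem.Str.strip text)).toList = l
    have h := key l
    simp only [schemePhase, wwwPhase] at h
    simp at h ⊢
    exact h
  · simp
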